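-- pv_equiv track=rewrite | github.com/academic-resources/stared-repos | leetcodely/python/bomb_enemy.py | total_kills
-- ===== SOURCE A (Python) =====
-- def total_kills(row, col, grid):
--     count = 0
--     i = col
--     while i >= 0:
--         if grid[row][i] == 'E':
--             count += 1
--         elif grid[row][i] == 'W':
--             break
--         i -= 1
--     i = col
--     while i < len(grid[0]):
--         if grid[row][i] == 'E':
--             count += 1
--         elif grid[row][i] == 'W':
--             break
--         i += 1
--     i = row
--     while i >= 0:
--         if grid[i][col] == 'E':
--             count += 1
--         elif grid[i][col] == 'W':
--             break
--         i -= 1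
--     i = row
--     while i < len(grid):
--         if grid[i][col] == 'E':
--             count += 1
--         elif grid[i][col] == 'W':
--             break
--         i += 1
--     return count
-- ===== SOURCE B (Python) =====
-- def total_kills(row, col, grid):
--     m, n = len(grid), len(grid[0])
--     def walk(r, c, dr, dc):
--         # only the stepped coordinate can fall off the grid
--         if dr < 0 and r < 0 or dr > 0 and r >= m or dc < 0 and c < 0 or dc > 0 and c >= n:
--             return 0
--         cell = grid[r][c]
--         if cell == 'W':
--             return 0
--         return (cell == 'E') + walk(r + dr, c + dc, dr, dc)
--     return sum(walk(row, col, dr, dc) for dr, dc in ((0, -1), (0, 1), (-1, 0), (1, 0)))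
-- ===== Notes on version B (the rewrite author's own statement) =====
-- stated objective: simpler
-- what changed: A's four separate index while-loops with breaks and a running counter become one recursive ray walker parameterised by a direction delta and summed over the four deltas; each walk starts at the bomb cell (so the centre is counted once per direction, as in A) and bound-checks only the coordinate it steps.
-- outside the precondition, e.g. on total_kills(0, 1, [['0', 'W'], ['E']]): A returns 0, B returns 0
import Mathlib
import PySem

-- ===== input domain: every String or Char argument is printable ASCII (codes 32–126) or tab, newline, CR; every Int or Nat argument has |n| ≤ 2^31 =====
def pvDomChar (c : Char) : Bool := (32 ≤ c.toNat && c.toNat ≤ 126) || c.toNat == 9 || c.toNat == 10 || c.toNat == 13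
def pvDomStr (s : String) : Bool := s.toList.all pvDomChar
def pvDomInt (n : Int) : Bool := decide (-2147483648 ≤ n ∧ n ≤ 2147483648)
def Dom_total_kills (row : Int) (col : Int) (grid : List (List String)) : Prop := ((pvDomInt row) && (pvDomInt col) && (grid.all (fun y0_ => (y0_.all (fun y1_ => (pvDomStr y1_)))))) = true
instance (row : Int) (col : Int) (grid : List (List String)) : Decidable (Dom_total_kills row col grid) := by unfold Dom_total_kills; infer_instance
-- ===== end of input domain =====

-- B replaces A's four separate index while-loops by one recursive ray walker over the four
-- direction deltas, each walk starting at the bomb cell and bound-checking only the stepped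
-- coordinate; same cost, plainer code.

-- grid[r][i] (Python indexing; the `.getD` default is only reached where Python raises
-- IndexError, which Pre_ excludes)
def pvCell (g : List (List String)) (r i : Int) : String :=
  (PySem.List.pyGet? ((PySem.List.pyGet? g r).getD []) i).getD ""

-- ===== PORT A =====
-- `while i >= 0:` reading grid[row][i] (twice, as A does), i -= 1; fuel (col+1).toNat covers all iterations
def aLeft (g : List (List String)) (row : Int) : Nat → Int → Int → Int
  | 0, _, count => count
  | f+1, i, count =>
    if i < 0 then count
    else if pvCell g row i == "E" then aLeft g row f (i-1) (count+1)
    else if pvCell g row i == "W" then count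
    else aLeft g row f (i-1) count

-- `while i < len(grid[0]):` reading grid[row][i], i += 1
def aRight (g : List (List String)) (row n : Int) : Nat → Int → Int → Int
  | 0, _, count => count
  | f+1, i, count =>
    if n ≤ i then count
    else if pvCell g row i == "E" then aRight g row n f (i+1) (count+1)
    else if pvCell g row i == "W" then count
    else aRight g row n f (i+1) count

-- `while i >= 0:` reading grid[i][col], i -= 1
def aUp (g : List (List String)) (col : Int) : Nat → Int → Int → Int
  | 0, _, count => count
  | f+1, i, count =>
    if i < 0 then count
    else if pvCell g i col == "E" then aUp g col f (i-1) (count+1)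
    else if pvCell g i col == "W" then count
    else aUp g col f (i-1) count

-- `while i < len(grid):` reading grid[i][col], i += 1
def aDown (g : List (List String)) (col m : Int) : Nat → Int → Int → Int
  | 0, _, count => count
  | f+1, i, count =>
    if m ≤ i then count
    else if pvCell g i col == "E" then aDown g col m f (i+1) (count+1)
    else if pvCell g i col == "W" then count
    else aDown g col m f (i+1) count

def total_kills (row : Int) (col : Int) (grid : List (List String)) : Int :=
  let n : Int := ((PySem.List.pyGet? grid 0).getD []).length
  let m : Int := grid.length
  let c1 := aLeft grid row (col+1).toNat col 0
  let c2 := aRight grid row n (n - col).toNat col c1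
  let c3 := aUp grid col (row+1).toNat row c2
  aDown grid col m (m - row).toNat row c3

-- ===== PORT B =====
-- Source B's walk(r, c, dr, dc): recursive ray walk from (r,c) in direction (dr,dc), stopping at
-- the first 'W' or when the stepped coordinate leaves the grid; fuel bounds the recursion
-- depth (Python recurses freely; the fuel below covers every admitted walk)
def bWalk (g : List (List String)) (m n : Int) : Nat → Int → Int → Int → Int → Int
  | 0, _, _, _, _ => 0
  | f+1, r, c, dr, dc =>
    if (dr < 0 ∧ r < 0) ∨ (0 < dr ∧ m ≤ r) ∨ (dc < 0 ∧ c < 0) ∨ (0 < dc ∧ n ≤ c) then 0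
    else
      let cell := pvCell g r c
      if cell == "W" then 0
      else (if cell == "E" then 1 else 0) + bWalk g m n f (r+dr) (c+dc) dr dc

def total_kills_alt (row : Int) (col : Int) (grid : List (List String)) : Int :=
  let m : Int := grid.length
  let n : Int := ((PySem.List.pyGet? grid 0).getD []).length
  let fuel : Nat := (m + n).toNat + row.natAbs + col.natAbs + 1
  ([((0:Int),(-1:Int)), (0,1), (-1,0), (1,0)]).foldl
    (fun acc d => acc + bWalk grid m n fuel row col d.1 d.2) 0

-- ===== PRECONDITION & SPEC =====
-- Pre_ excludes the inputs on which the Python A raises IndexError; being closed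
-- form it is slightly narrower than A's exact raise set in the content-dependent corner
-- where a 'W' truncates a scan just before a missing cell of a ragged grid — there A
-- returns and B returns the identical value, so nothing behavioural is hidden.
def Pre_total_kills (row : Int) (col : Int) (grid : List (List String)) : Prop :=
  grid ≠ [] ∧
  -(grid.length : Int) ≤ row ∧ row < (grid.length : Int) ∧
  col < ((grid.headD []).length : Int) ∧
  ((grid.headD []).length : Int) ≤ (((PySem.List.pyGet? grid row).getD []).length : Int) ∧
  ∀ r ∈ grid, -(r.length : Int) ≤ col ∧ col < (r.length : Int)
instance (row : Int) (col : Int) (grid : List (List String)) : Decidable (Pre_total_kills row col grid) := by unfold Pre_total_kills; infer_instance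

def pvWitness_total_kills : Int × Int × List (List String) := (0, 0, [["E", "0"], ["W", "E"]])

def Spec_total_kills (row : Int) (col : Int) (grid : List (List String)) (out : Int) : Prop := out = total_kills_alt row col grid
instance (row : Int) (col : Int) (grid : List (List String)) (out : Int) : Decidable (Spec_total_kills row col grid out) := by unfold Spec_total_kills; infer_instance

-- ===== CLAIM (what is proved, stated in full; the proofs are below) =====
def Claim_equal_total_kills : Prop := ∀ (row : Int) (col : Int) (grid : List (List String)), Dom_total_kills row col grid → Pre_total_kills row col grid → Spec_total_kills row col grid (total_kills row col grid)

-- ===== LEMMAS AND PROOFS =====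

theorem walk_left (g : List (List String)) (m n row : Int) :
    ∀ (f f' : Nat) (i count : Int), (i+1).toNat ≤ f → (i+1).toNat ≤ f' →
      aLeft g row f i count = count + bWalk g m n f' row i 0 (-1) := by
  intro f
  induction f with
  | zero =>
    intro f' i count hf hf'
    cases f' <;> simp [aLeft, bWalk] <;> omega
  | succ f ih =>
    intro f' i count hf hf'
    by_cases hi : i < 0
    · cases f' with
      | zero => simp [aLeft, bWalk, hi]
      | succ f'' =>
        simp only [aLeft, bWalk, if_pos hi]
        rw [if_pos (by omega : ((0:Int) < 0 ∧ row < 0) ∨ ((0:Int) < 0 ∧ m ≤ row) ∨ ((-1:Int) < 0 ∧ i < 0) ∨ ((0:Int) < -1 ∧ n ≤ i))]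
        ring
    · cases f' with
      | zero => omega
      | succ f'' =>
        simp only [aLeft, bWalk, if_neg hi]
        rw [if_neg (by omega : ¬ (((0:Int) < 0 ∧ row < 0) ∨ ((0:Int) < 0 ∧ m ≤ row) ∨ ((-1:Int) < 0 ∧ i < 0) ∨ ((0:Int) < -1 ∧ n ≤ i)))]
        have hrow : row + (0:Int) = row := by ring
        have hci : i + (-1:Int) = i - 1 := by ring
        rw [hrow, hci]
        by_cases hE : pvCell g row i == "E"
        · have hW : ¬ (pvCell g row i == "W") := by
            simp only [beq_iff_eq] at hE ⊢; simp [hE]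
          rw [if_pos hE, if_neg hW, if_pos hE,
            ih f'' (i-1) (count+1) (by omega) (by omega)]
          ring
        · rw [if_neg hE, if_neg hE]
          by_cases hW : pvCell g row i == "W"
          · rw [if_pos hW, if_pos hW]; ring
          · rw [if_neg hW, if_neg hW, ih f'' (i-1) count (by omega) (by omega)]
            ring

theorem walk_right (g : List (List String)) (m n row : Int) :
    ∀ (f f' : Nat) (i count : Int), (n - i).toNat ≤ f → (n - i).toNat ≤ f' →
      aRight g row n f i count = count + bWalk g m n f' row i 0 1 := by
  intro f
  induction f with
  | zero =>
    intro f' i count hf hf'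
    cases f' <;> simp [aRight, bWalk] <;> omega
  | succ f ih =>
    intro f' i count hf hf'
    by_cases hi : n ≤ i
    · cases f' with
      | zero => simp [aRight, bWalk, hi]
      | succ f'' =>
        simp only [aRight, bWalk, if_pos hi]
        rw [if_pos (by omega : ((0:Int) < 0 ∧ row < 0) ∨ ((0:Int) < 0 ∧ m ≤ row) ∨ ((1:Int) < 0 ∧ i < 0) ∨ ((0:Int) < 1 ∧ n ≤ i))]
        ring
    · cases f' with
      | zero => omega
      | succ f'' =>
        simp only [aRight, bWalk, if_neg hi]
        rw [if_neg (by omega : ¬ (((0:Int) < 0 ∧ row < 0) ∨ ((0:Int) < 0 ∧ m ≤ row) ∨ ((1:Int) < 0 ∧ i < 0) ∨ ((0:Int) < 1 ∧ n ≤ i)))]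
        have hrow : row + (0:Int) = row := by ring
        rw [hrow]
        by_cases hE : pvCell g row i == "E"
        · have hW : ¬ (pvCell g row i == "W") := by
            simp only [beq_iff_eq] at hE ⊢; simp [hE]
          rw [if_pos hE, if_neg hW, if_pos hE,
            ih f'' (i+1) (count+1) (by omega) (by omega)]
          ring
        · rw [if_neg hE, if_neg hE]
          by_cases hW : pvCell g row i == "W"
          · rw [if_pos hW, if_pos hW]; ring
          · rw [if_neg hW, if_neg hW, ih f'' (i+1) count (by omega) (by omega)]
            ring

theorem walk_up (g : List (List String)) (m n col : Int) :
    ∀ (f f' : Nat) (i count : Int), (i+1).toNat ≤ f → (i+1).toNat ≤ f' →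
      aUp g col f i count = count + bWalk g m n f' i col (-1) 0 := by
  intro f
  induction f with
  | zero =>
    intro f' i count hf hf'
    cases f' <;> simp [aUp, bWalk] <;> omega
  | succ f ih =>
    intro f' i count hf hf'
    by_cases hi : i < 0
    · cases f' with
      | zero => simp [aUp, bWalk, hi]
      | succ f'' =>
        simp only [aUp, bWalk, if_pos hi]
        rw [if_pos (by omega : ((-1:Int) < 0 ∧ i < 0) ∨ ((0:Int) < -1 ∧ m ≤ i) ∨ ((0:Int) < 0 ∧ col < 0) ∨ ((0:Int) < 0 ∧ n ≤ col))]
        ring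
    · cases f' with
      | zero => omega
      | succ f'' =>
        simp only [aUp, bWalk, if_neg hi]
        rw [if_neg (by omega : ¬ (((-1:Int) < 0 ∧ i < 0) ∨ ((0:Int) < -1 ∧ m ≤ i) ∨ ((0:Int) < 0 ∧ col < 0) ∨ ((0:Int) < 0 ∧ n ≤ col)))]
        have hcol : col + (0:Int) = col := by ring
        have hci : i + (-1:Int) = i - 1 := by ring
        rw [hcol, hci]
        by_cases hE : pvCell g i col == "E"
        · have hW : ¬ (pvCell g i col == "W") := by
            simp only [beq_iff_eq] at hE ⊢; simp [hE]
          rw [if_pos hE, if_neg hW, if_pos hE,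
            ih f'' (i-1) (count+1) (by omega) (by omega)]
          ring
        · rw [if_neg hE, if_neg hE]
          by_cases hW : pvCell g i col == "W"
          · rw [if_pos hW, if_pos hW]; ring
          · rw [if_neg hW, if_neg hW, ih f'' (i-1) count (by omega) (by omega)]
            ring

theorem walk_down (g : List (List String)) (m n col : Int) :
    ∀ (f f' : Nat) (i count : Int), (m - i).toNat ≤ f → (m - i).toNat ≤ f' →
      aDown g col m f i count = count + bWalk g m n f' i col 1 0 := by
  intro f
  induction f with
  | zero =>
    intro f' i count hf hf'
    cases f' <;> simp [aDown, bWalk] <;> omega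
  | succ f ih =>
    intro f' i count hf hf'
    by_cases hi : m ≤ i
    · cases f' with
      | zero => simp [aDown, bWalk, hi]
      | succ f'' =>
        simp only [aDown, bWalk, if_pos hi]
        rw [if_pos (by omega : ((1:Int) < 0 ∧ i < 0) ∨ ((0:Int) < 1 ∧ m ≤ i) ∨ ((0:Int) < 0 ∧ col < 0) ∨ ((0:Int) < 0 ∧ n ≤ col))]
        ring
    · cases f' with
      | zero => omega
      | succ f'' =>
        simp only [aDown, bWalk, if_neg hi]
        rw [if_neg (by omega : ¬ (((1:Int) < 0 ∧ i < 0) ∨ ((0:Int) < 1 ∧ m ≤ i) ∨ ((0:Int) < 0 ∧ col < 0) ∨ ((0:Int) < 0 ∧ n ≤ col)))]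
        have hcol : col + (0:Int) = col := by ring
        rw [hcol]
        by_cases hE : pvCell g i col == "E"
        · have hW : ¬ (pvCell g i col == "W") := by
            simp only [beq_iff_eq] at hE ⊢; simp [hE]
          rw [if_pos hE, if_neg hW, if_pos hE,
            ih f'' (i+1) (count+1) (by omega) (by omega)]
          ring
        · rw [if_neg hE, if_neg hE]
          by_cases hW : pvCell g i col == "W"
          · rw [if_pos hW, if_pos hW]; ring
          · rw [if_neg hW, if_neg hW, ih f'' (i+1) count (by omega) (by omega)]
            ring

theorem ports_eq (row : Int) (col : Int) (grid : List (List String)) :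
    total_kills row col grid = total_kills_alt row col grid := by
  unfold total_kills total_kills_alt
  simp only [List.foldl]
  set n : Int := (((PySem.List.pyGet? grid 0).getD []).length : Int) with hn
  set m : Int := ((grid.length : Nat) : Int) with hm
  have hn0 : 0 ≤ n := by positivity
  have hm0 : 0 ≤ m := by positivity
  set F : Nat := (m + n).toNat + row.natAbs + col.natAbs + 1 with hF
  rw [walk_left grid m n row (col+1).toNat F col 0 (le_refl _) (by omega)]
  rw [walk_right grid m n row (n-col).toNat F col _ (le_refl _) (by omega)]
  rw [walk_up grid m n col (row+1).toNat F row _ (le_refl _) (by omega)]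
  rw [walk_down grid m n col (m-row).toNat F row _ (le_refl _) (by omega)]

-- ===== VERDICT (by name: the statement is the Claim_ definition above) =====
theorem total_kills_spec : Claim_equal_total_kills := by
  intro row col grid _ _
  exact ports_eq row col grid
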